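-- pv_equiv track=rewrite | github.com/lahiru-98/flask_chezer | app.py | getAnsweredTimesList
-- ===== SOURCE A (Python) =====
-- def getAnsweredTimesList(answerGivenTimes):
--     answerGivenTimesList = answerGivenTimes.split(",")
--     arrlen = len(answerGivenTimesList)
--     returnlist = []
--     for i in range(0,4):
--         if i<arrlen:
--             returnlist.append(answerGivenTimesList[i])
--         else:
--             returnlist.append("0")
--     return returnlist
-- ===== SOURCE B (Python) =====
-- def getAnsweredTimesList(answerGivenTimes):
--     # Single character-level scan: build fields on the fly, stop as soon as
--     # four fields are collected; never materializes the full split list.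
--     out = []
--     cur = []
--     for ch in answerGivenTimes:
--         if ch == ',':
--             out.append(''.join(cur))
--             if len(out) == 4:
--                 return out
--             cur = []
--         else:
--             cur.append(ch)
--     out.append(''.join(cur))
--     return out + ["0"] * (4 - len(out))
-- ===== Notes on version B (the rewrite author's own statement) =====
-- stated objective: alternative
-- what changed: Replaced split-then-index (A splits the whole string, then loops i in range(4) branching on i<len) by a single character-level scan that builds fields incrementally and returns as soon as four fields are collected, never materializing the full split list; trades the library split for an explicit early-exit scan.
import Mathlib
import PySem

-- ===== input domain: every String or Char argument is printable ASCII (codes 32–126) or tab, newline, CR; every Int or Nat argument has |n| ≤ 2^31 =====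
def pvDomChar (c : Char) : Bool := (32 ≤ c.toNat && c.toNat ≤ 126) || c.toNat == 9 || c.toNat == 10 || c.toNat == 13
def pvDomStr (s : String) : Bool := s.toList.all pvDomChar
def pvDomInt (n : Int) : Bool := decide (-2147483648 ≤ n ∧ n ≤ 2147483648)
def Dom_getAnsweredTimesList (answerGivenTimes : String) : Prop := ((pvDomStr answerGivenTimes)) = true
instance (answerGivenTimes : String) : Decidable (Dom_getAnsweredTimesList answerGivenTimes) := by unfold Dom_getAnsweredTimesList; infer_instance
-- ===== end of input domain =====

-- B replaces A's split-then-index loop by a single character-level scan that collects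
-- fields incrementally and stops once four are found; same return values.
-- ===== PORT A =====
def getAnsweredTimesList (answerGivenTimes : String) : List String :=
  let answerGivenTimesList := (PySem.Str.split? answerGivenTimes ",").getD []
  let arrlen : Int := answerGivenTimesList.length
  (PySem.List.pyRange 0 4 1).foldl (fun returnlist i =>
    if i < arrlen then
      returnlist ++ [(PySem.List.pyGet? answerGivenTimesList i).getD ""]
    else
      returnlist ++ ["0"]) []

-- ===== PORT B =====
-- the for-loop of Source B (early return when four fields collected), as structural recursion
def pvScan : List Char → List Char → List String → List String
  | [], cur, out =>
      let out := out ++ [String.ofList cur]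
      out ++ List.replicate (4 - out.length) "0"
  | c :: rest, cur, out =>
      if c = ',' then
        let out := out ++ [String.ofList cur]
        if out.length = 4 then out else pvScan rest [] out
      else pvScan rest (cur ++ [c]) out

def getAnsweredTimesList_alt (answerGivenTimes : String) : List String :=
  pvScan answerGivenTimes.toList [] []

-- ===== PRECONDITION & SPEC =====
def Spec_getAnsweredTimesList (answerGivenTimes : String) (out : List String) : Prop := out = getAnsweredTimesList_alt answerGivenTimes
instance (answerGivenTimes : String) (out : List String) : Decidable (Spec_getAnsweredTimesList answerGivenTimes out) := by unfold Spec_getAnsweredTimesList; infer_instance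

-- ===== CLAIM (what is proved, stated in full; the proofs are below) =====
def Claim_equal_getAnsweredTimesList : Prop := ∀ (answerGivenTimes : String), Dom_getAnsweredTimesList answerGivenTimes → Spec_getAnsweredTimesList answerGivenTimes (getAnsweredTimesList answerGivenTimes)

-- ===== LEMMAS AND PROOFS =====

-- char-level comma-splitter: myFields pre l = the comma fields of pre ++ l (pre comma-free in use)
def myFields : List Char → List Char → List (List Char)
  | pre, [] => [pre]
  | pre, c :: rest => if c = ',' then pre :: myFields [] rest else myFields (pre ++ [c]) rest

theorem splitOn_go_eq (l : List Char) : ∀ (cur : List Char) (acc : List (List Char)) (fuel : Nat),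
    l.length + 1 ≤ fuel →
    PySem.Chars.splitOn.go [','] fuel l cur acc
      = acc.reverse ++ myFields cur.reverse l := by
  induction l with
  | nil =>
    intro cur acc fuel h
    rcases fuel with _ | n
    · omega
    simp [PySem.Chars.splitOn.go, myFields]
  | cons c rest ih =>
    intro cur acc fuel h
    rcases fuel with _ | n
    · omega
    by_cases hc : c = ','
    · subst hc
      simp only [PySem.Chars.splitOn.go, List.isPrefixOf, BEq.rfl, Bool.true_and,
        if_true, List.length_cons, List.drop_succ_cons, List.length_nil, List.drop_zero, myFields]
      rw [ih [] (cur.reverse :: acc) n (by simp at h ⊢; omega)]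
      simp
    · have hpre : [','].isPrefixOf (c :: rest) = false := by
        simp [List.isPrefixOf]; intro hh; exact hc hh.symm
      simp only [PySem.Chars.splitOn.go, hpre, if_neg, Bool.false_eq_true, not_false_iff]
      rw [ih (c :: cur) acc n (by simp at h ⊢; omega)]
      simp [myFields, hc]

theorem splitOn_eq_myFields (s : List Char) :
    PySem.Chars.splitOn s [','] = myFields [] s := by
  have := splitOn_go_eq s [] [] (s.length + 1) (le_refl _)
  simpa [PySem.Chars.splitOn] using this

-- A's foldl over range(4): the index loop realises take-4-then-pad of the split list
theorem pad_big (a b c d : String) (rest : List String) :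
    (PySem.List.pyRange 0 4 1).foldl (fun returnlist i =>
      if i < ((a::b::c::d::rest).length : Int) then
        returnlist ++ [(PySem.List.pyGet? (a::b::c::d::rest) i).getD ""]
      else
        returnlist ++ ["0"]) []
    = [a,b,c,d] := by
  simp [PySem.List.pyRange, List.range_succ, show ((4:Int).toNat)=4 from rfl]
  split_ifs <;> first
    | omega
    | simp [*, PySem.List.pyGet?, PySem.List.pyIdx?,
            show ((1:Int).toNat)=1 from rfl, show ((2:Int).toNat)=2 from rfl,
            show ((3:Int).toNat)=3 from rfl]

theorem pad4_eq (lst : List String) :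
    (PySem.List.pyRange 0 4 1).foldl (fun returnlist i =>
      if i < (lst.length : Int) then
        returnlist ++ [(PySem.List.pyGet? lst i).getD ""]
      else
        returnlist ++ ["0"]) []
    = lst.take 4 ++ List.replicate (4 - (lst.take 4).length) "0" := by
  rcases lst with _ | ⟨a, _ | ⟨b, _ | ⟨c, _ | ⟨d, rest⟩⟩⟩⟩ <;>
    first
      | (norm_num [PySem.List.pyRange, PySem.List.pyGet?, PySem.List.pyIdx?, List.range_succ,
                   List.replicate, show ((4:Int).toNat)=4 from rfl, show ((1:Int).toNat)=1 from rfl,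
                   show ((2:Int).toNat)=2 from rfl, show ((3:Int).toNat)=3 from rfl]
         done)
      | exact (pad_big a b c d rest).trans (by simp)

-- B's scan computes take-4-then-pad of (out ++ fields of the remaining input)
theorem pvScan_eq (l : List Char) : ∀ (cur : List Char) (out : List String),
    out.length < 4 →
    pvScan l cur out
      = ((out ++ (myFields cur l).map String.ofList).take 4)
        ++ List.replicate (4 - ((out ++ (myFields cur l).map String.ofList).take 4).length) "0" := by
  induction l with
  | nil =>
    intro cur out h
    have hlen : (out ++ [String.ofList cur]).length ≤ 4 := by simp; omega
    simp [pvScan, myFields, List.take_of_length_le hlen]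
  | cons c rest ih =>
    intro cur out h
    by_cases hc : c = ','
    · subst hc
      simp only [pvScan, myFields]
      by_cases h4 : (out ++ [String.ofList cur]).length = 4
      · have hout3 : out.length = 3 := by simp at h4; omega
        rw [if_pos h4]
        have : (out ++ String.ofList cur :: (myFields [] rest).map String.ofList).take 4
            = out ++ [String.ofList cur] := by
          rw [show out ++ String.ofList cur :: (myFields [] rest).map String.ofList
              = (out ++ [String.ofList cur]) ++ (myFields [] rest).map String.ofList by simp]
          rw [List.take_append_of_le_length (by omega), List.take_of_length_le (by omega)]
        simp [this, h4]
      · rw [if_neg h4]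
        rw [ih [] (out ++ [String.ofList cur]) (by simp at h4 ⊢; omega)]
        simp
    · simp only [pvScan, if_neg hc, myFields]
      rw [ih (cur ++ [c]) out h]

-- ===== VERDICT (by name: the statement is the Claim_ definition above) =====
theorem getAnsweredTimesList_spec : Claim_equal_getAnsweredTimesList := by
  intro s _
  unfold Spec_getAnsweredTimesList getAnsweredTimesList getAnsweredTimesList_alt
  rw [pvScan_eq s.toList [] [] (by simp)]
  have hsplit : (PySem.Str.split? s ",").getD []
      = (myFields [] s.toList).map String.ofList := by
    simp [PySem.Str.split?, PySem.Chars.split?, splitOn_eq_myFields,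
      show (",".toList) = [','] from rfl]
  rw [hsplit, pad4_eq]
  simp
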